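-- pv_equiv track=rewrite | github.com/PolyJIT/benchbuild | benchbuild/experiments/sequences/seq_statistics.py | __find_frequent_subsequences
-- ===== SOURCE A (Python) =====
-- def __find_frequent_subsequences(sequences):
--     """Tries to find frequent subsequences in the specified list of sequences.
--     """
--     passes = set()
--
--     for sequence in sequences:
--         for p in sequence:
--             passes.add(p)
--
--     passes = list(passes)
--
--     subsequences = []
--     for p in passes:
--         subsequences.append([p])
--     occurrences = {}
--
--     while subsequences:
--         new_subsequences = []
--
--         for subsequence in subsequences:
--             for p in passes:
--                 new_subsequence = list(subsequence)
--                 new_subsequence.append(p)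
--                 new_subsequences.append(new_subsequence)
--
--         subsequences = new_subsequences
--
--         for subsequence in subsequences:
--             for sequence in sequences:
--                 contained = True
--
--                 for i in range(len(subsequence)):
--                     if len(sequence) >= len(subsequence[i::]) \
--                             and subsequence[i] in sequence:
--                         index = sequence.index(subsequence[i])
--                         sequence = sequence[(index + 1)::]
--                     else:
--                         contained = False
--                         break
--
--                 if contained:
--                     if str(subsequence) in occurrences:
--                         occurrences[str(subsequence)] += 1
--                     else:
--                         occurrences[str(subsequence)] = 1
--
--         remaining = []
--         for subsequence in subsequences:
--             key = str(subsequence)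
--             if key in occurrences and occurrences[key] >= 2:
--                 remaining.append(subsequence)
--
--         subsequences = remaining
--
--     return occurrences
-- ===== SOURCE B (Python) =====
-- def __find_frequent_subsequences(sequences):
--     """Tries to find frequent subsequences in the specified list of sequences.
--
--     Projection-based (PrefixSpan-style): each surviving subsequence carries the
--     list of suffixes of the sequences that remain after greedily matching it,
--     so support of an extension is just the length of the projected list.
--     """
--     passes = list(dict.fromkeys(p for sequence in sequences for p in sequence))
--
--     def project(suffixes, p):
--         projected = []
--         for suffix in suffixes:
--             if p in suffix:
--                 projected.append(suffix[suffix.index(p) + 1:])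
--         return projected
--
--     occurrences = {}
--     level = [([p], project(sequences, p)) for p in passes]
--
--     while level:
--         next_level = []
--         for subseq, suffixes in level:
--             for p in passes:
--                 candidate = subseq + [p]
--                 projected = project(suffixes, p)
--                 count = len(projected)
--                 if count:
--                     key = str(candidate)
--                     occurrences[key] = occurrences.get(key, 0) + count
--                 if count >= 2:
--                     next_level.append((candidate, projected))
--         level = next_level
--
--     return occurrences
-- ===== Notes on version B (the rewrite author's own statement) =====
-- stated objective: faster
-- what changed: B is a PrefixSpan-style projection miner: each surviving subsequence carries its projected database (the suffix of every sequence left after greedily matching it), so a candidate's support is the length of the projection after one first-occurrence step, instead of A's re-matching of the whole candidate against every full sequence each level; A's three per-level passes (generate, count, filter) become one fused pass.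
import Mathlib
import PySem

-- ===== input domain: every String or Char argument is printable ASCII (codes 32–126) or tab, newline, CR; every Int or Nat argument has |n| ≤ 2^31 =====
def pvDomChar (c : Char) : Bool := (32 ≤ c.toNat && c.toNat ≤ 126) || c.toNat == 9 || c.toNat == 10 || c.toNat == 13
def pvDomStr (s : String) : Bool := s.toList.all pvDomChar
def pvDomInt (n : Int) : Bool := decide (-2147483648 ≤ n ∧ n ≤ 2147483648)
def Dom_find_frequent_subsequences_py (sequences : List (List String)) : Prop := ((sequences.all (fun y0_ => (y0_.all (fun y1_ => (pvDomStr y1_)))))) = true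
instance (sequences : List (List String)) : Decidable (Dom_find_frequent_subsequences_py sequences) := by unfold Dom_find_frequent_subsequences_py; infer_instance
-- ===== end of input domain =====

-- B mines with PrefixSpan-style projected suffix databases (support = length of the
-- projection) in one fused pass per level, instead of A's generate/count/filter passes
-- that re-match every candidate against every full sequence (objective: faster, as measured
-- in a timing run).


-- ===== PORT A =====
-- shared by both ports: Python's str(list_of_str) = '[' + ', '.join(repr(x)) + ']';
-- repr is exact for printable-ASCII strings plus tab/newline/CR (the stated Dom)
def pvReprChars (q : Char) : List Char → List Char
  | [] => []
  | c :: cs =>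
    (if c = '\\' then ['\\', '\\']
     else if c = q then ['\\', q]
     else if c = '\t' then ['\\', 't']
     else if c = '\n' then ['\\', 'n']
     else if c = '\r' then ['\\', 'r']
     else [c]) ++ pvReprChars q cs

-- repr s with Python's quote choice
def pvEncItem (cs : List Char) : List Char :=
  let q : Char := if cs.contains '\'' && !cs.contains '"' then '"' else '\''
  q :: (pvReprChars q cs ++ [q])

-- ', '.join
def pvJoin : List (List Char) → List Char
  | [] => []
  | [x] => x
  | x :: y :: t => x ++ ',' :: ' ' :: pvJoin (y :: t)

def pvKey (sub : List String) : String :=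
  String.ofList ('[' :: (pvJoin (sub.map (fun s => pvEncItem s.toList)) ++ [']']))

-- A's inner containment loop: for i in range(len(subsequence)): length guard + 'in' + index + slice
def containedA : List String → List String → Bool
  | [], _ => true
  | x :: rest, seq =>
    if rest.length + 1 ≤ seq.length ∧ seq.contains x then
      -- sequence = sequence[(index + 1)::]
      containedA rest
        (PySem.List.slice seq (some (((PySem.List.index? seq x).getD 0 : Int) + 1)) none)
    else false

-- A's 'while subsequences:' loop; the fuel (max sequence length bounds the level count) only
-- makes the recursion structural and never runs out at the call below
def loopA (sequences : List (List String)) (passes : List String) :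
    Nat → List (List String) → PySem.Dict String Int → PySem.Dict String Int
  | 0, _, occ => occ
  | fuel + 1, subs, occ =>
    if subs = [] then occ
    else
      let news := subs.foldl (fun acc s => passes.foldl (fun acc p => acc ++ [s ++ [p]]) acc) []
      let occ' := news.foldl (fun occ sub =>
          sequences.foldl (fun occ seq =>
            if containedA sub seq then
              match occ.get? (pvKey sub) with
              | some c => occ.insert (pvKey sub) (c + 1)
              | none => occ.insert (pvKey sub) 1
            else occ) occ) occ
      let remaining := news.foldl (fun acc sub =>
          if occ'.contains (pvKey sub) && decide (occ'.getD (pvKey sub) 0 ≥ 2)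
          then acc ++ [sub] else acc) []
      loopA sequences passes fuel remaining occ'

def find_frequent_subsequences_py (sequences : List (List String)) : List (String × Int) :=
  let passes : List String :=
    sequences.foldl (fun ps seq => seq.foldl (fun ps p => PySem.Set.add ps p) ps) PySem.Set.empty
  let subsequences := passes.foldl (fun acc p => acc ++ [[p]]) []
  (loopA sequences passes ((sequences.map List.length).sum + 2) subsequences PySem.Dict.empty).items

-- ===== PORT B =====
-- project(suffixes, p): keep, for each suffix containing p, what follows p's first occurrence
def projectB (suffixes : List (List String)) (p : String) : List (List String) :=
  suffixes.foldl (fun acc suffix =>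
    if suffix.contains p then
      acc ++ [PySem.List.slice suffix (some (((PySem.List.index? suffix p).getD 0 : Int) + 1)) none]
    else acc) []

-- B's 'while level:' loop over (subsequence, projected suffixes) pairs (same fuel guard as loopA)
def loopB (passes : List String) :
    Nat → List (List String × List (List String)) → PySem.Dict String Int → PySem.Dict String Int
  | 0, _, occ => occ
  | fuel + 1, level, occ =>
    if level = [] then occ
    else
      let st := level.foldl
        (fun (st : List (List String × List (List String)) × PySem.Dict String Int) sp =>
          passes.foldl (fun st p =>
            let candidate := sp.1 ++ [p]
            let projected := projectB sp.2 p
            let count : Int := projected.length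
            (if count ≥ 2 then st.1 ++ [(candidate, projected)] else st.1,
             if count ≠ 0 then st.2.insert (pvKey candidate) (st.2.getD (pvKey candidate) 0 + count)
             else st.2)) st)
        ([], occ)
      loopB passes fuel st.1 st.2

def find_frequent_subsequences_py_alt (sequences : List (List String)) : List (String × Int) :=
  let passes : List String := PySem.List.dedup (sequences.flatMap (fun s => s))
  (loopB passes ((sequences.map List.length).sum + 2)
    (passes.map (fun p => ([p], projectB sequences p))) PySem.Dict.empty).items

-- ===== PRECONDITION & SPEC =====
def Spec_find_frequent_subsequences_py (sequences : List (List String)) (out : List (String × Int)) : Prop := out = find_frequent_subsequences_py_alt sequences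
instance (sequences : List (List String)) (out : List (String × Int)) : Decidable (Spec_find_frequent_subsequences_py sequences out) := by unfold Spec_find_frequent_subsequences_py; infer_instance

-- ===== CLAIM (what is proved, stated in full; the proofs are below) =====
def Claim_equal_find_frequent_subsequences_py : Prop := ∀ (sequences : List (List String)), Dom_find_frequent_subsequences_py sequences → Spec_find_frequent_subsequences_py sequences (find_frequent_subsequences_py sequences)

-- ===== LEMMAS AND PROOFS =====

-- the greedy one-step residual: what remains of seq after the first occurrence of p
def dropAfter (p : String) (seq : List String) : List String :=
  PySem.List.slice seq (some (((PySem.List.index? seq p).getD 0 : Int) + 1)) none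

-- the greedy residual of matching a whole subsequence (none = not contained)
def res : List String → List String → Option (List String)
  | [], seq => some seq
  | x :: r, seq => if seq.contains x then res r (dropAfter x seq) else none

theorem dropAfter_eq_drop (p : String) (seq : List String) (k : Nat)
    (hk : PySem.List.index? seq p = some k) : dropAfter p seq = seq.drop (k + 1) := by
  unfold dropAfter
  rw [hk]
  have hcast : ((k : Int)) + 1 = ((k + 1 : Nat) : Int) := by push_cast; ring
  rw [Option.getD_some, hcast, PySem.List.slice_from_natCast]

theorem drop_sublist_drop_of_le {α : Type} (l : List α) {a b : Nat} (h : a ≤ b) :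
    (l.drop b).Sublist (l.drop a) := by
  have : l.drop b = (l.drop a).drop (b - a) := by
    rw [List.drop_drop]; congr 1; omega
  rw [this]; exact List.drop_sublist _ _

-- core greedy fact: x ∈ seq with index k → (x::rest sublist of seq ↔ rest sublist of drop (k+1))
theorem greedy_step (x : String) (rest seq : List String) (k : Nat)
    (hk : PySem.List.index? seq x = some k) :
    ((x :: rest).Sublist seq ↔ rest.Sublist (seq.drop (k + 1))) := by
  obtain ⟨pre, suf, hseq, hprelen, hxpre⟩ := (PySem.List.index?_eq_some_iff seq x k).mp hk
  have hdrop : seq.drop (k + 1) = suf := by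
    subst hprelen; rw [hseq]; simp [List.drop_append]
  rw [hdrop]
  constructor
  · intro hs
    obtain ⟨r₁, r₂, hseq2, hxr₁, hsub2⟩ := List.cons_sublist_iff.mp hs
    have hklt : k + 1 ≤ r₁.length := by
      by_contra hcon
      have h1 : r₁ = seq.take r₁.length := by rw [hseq2]; simp
      have h2 : pre.take r₁.length = seq.take r₁.length := by
        rw [hseq, List.take_append_of_le_length (by omega)]
      have hxp : x ∈ pre.take r₁.length := by rw [h2, ← h1]; exact hxr₁
      exact hxpre ((List.take_sublist _ _).subset hxp)
    have hr₂ : r₂ = seq.drop r₁.length := by rw [hseq2]; simp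
    have hsub3 : rest.Sublist (seq.drop r₁.length) := hr₂ ▸ hsub2
    have := hsub3.trans (drop_sublist_drop_of_le seq hklt)
    rwa [hdrop] at this
  · intro hs
    rw [hseq]
    exact ((List.cons_sublist_cons.mpr hs).trans (List.sublist_append_right pre _))

-- A's guarded greedy scan decides the subsequence relation
theorem containedA_iff (sub seq : List String) : containedA sub seq = true ↔ sub.Sublist seq := by
  induction sub generalizing seq with
  | nil => simp [containedA]
  | cons x rest ih =>
    rw [containedA]
    by_cases hg : rest.length + 1 ≤ seq.length ∧ seq.contains x
    · rw [if_pos hg]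
      obtain ⟨hlen, hmem⟩ := hg
      have hmem' : x ∈ seq := by simpa using hmem
      obtain ⟨k, hk⟩ := Option.isSome_iff_exists.mp ((PySem.List.index?_isSome_iff seq x).mpr hmem')
      have hgetD : (PySem.List.index? seq x).getD 0 = k := by rw [hk]; rfl
      have hcast : (((k : Int)) + 1) = ((k + 1 : Nat) : Int) := by push_cast; ring
      rw [hgetD, hcast, PySem.List.slice_from_natCast, ih, greedy_step x rest seq k hk]
    · rw [if_neg hg]
      simp only [Bool.false_eq_true, false_iff]
      intro hs
      exact hg ⟨by simpa using hs.length_le, by simpa using hs.subset (List.mem_cons_self)⟩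

-- the residual exists exactly on contained subsequences
theorem res_isSome_iff (sub seq : List String) : (res sub seq).isSome = true ↔ sub.Sublist seq := by
  induction sub generalizing seq with
  | nil => simp [res]
  | cons x rest ih =>
    rw [res]
    by_cases hmem : seq.contains x
    · rw [if_pos hmem]
      have hmem' : x ∈ seq := by simpa using hmem
      obtain ⟨k, hk⟩ := Option.isSome_iff_exists.mp ((PySem.List.index?_isSome_iff seq x).mpr hmem')
      rw [dropAfter_eq_drop x seq k hk, ih, greedy_step x rest seq k hk]
    · rw [if_neg hmem]
      simp only [Option.isSome_none, Bool.false_eq_true, false_iff]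
      intro hs
      exact hmem (by simpa using hs.subset (List.mem_cons_self))

theorem containedA_eq_res (sub seq : List String) :
    containedA sub seq = (res sub seq).isSome := by
  rw [Bool.eq_iff_iff, containedA_iff, res_isSome_iff]

-- extending the matched subsequence by one pass = one more projection step on the residual
theorem res_append (sub : List String) (p : String) (seq : List String) :
    res (sub ++ [p]) seq
      = (res sub seq).bind (fun suf => if suf.contains p then some (dropAfter p suf) else none) := by
  induction sub generalizing seq with
  | nil => simp [res]
  | cons x r ih =>
    simp only [List.cons_append, res]
    by_cases h : seq.contains x
    · rw [if_pos h, if_pos h, ih]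
    · rw [if_neg h, if_neg h]; rfl

theorem projectB_eq (suffixes : List (List String)) (p : String) :
    projectB suffixes p
      = suffixes.filterMap (fun suf => if suf.contains p then some (dropAfter p suf) else none) := by
  unfold projectB
  have h : ∀ (l : List (List String)) (acc : List (List String)),
      l.foldl (fun acc suffix =>
        if suffix.contains p then
          acc ++ [PySem.List.slice suffix (some (((PySem.List.index? suffix p).getD 0 : Int) + 1)) none]
        else acc) acc
      = acc ++ l.filterMap (fun suf => if suf.contains p then some (dropAfter p suf) else none) := by
    intro l
    induction l with
    | nil => simp
    | cons x t iht =>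
      intro acc
      simp only [List.foldl_cons, List.filterMap_cons]
      by_cases hx : x.contains p
      · rw [if_pos hx, if_pos hx, iht]
        simp [dropAfter]
      · rw [if_neg hx, if_neg hx, iht]
  simpa using h suffixes []

theorem res_single (p : String) (seq : List String) :
    res [p] seq = if seq.contains p then some (dropAfter p seq) else none := by
  simp [res]

theorem filterMap_res_append (sequences : List (List String)) (c : List String) (p : String) :
    projectB (sequences.filterMap (res c)) p = sequences.filterMap (res (c ++ [p])) := by
  rw [projectB_eq, List.filterMap_filterMap]
  apply List.filterMap_congr
  intro seq _
  rw [res_append]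

theorem length_filterMap_res (sequences : List (List String)) (c : List String) :
    (sequences.filterMap (res c)).length = sequences.countP (fun s => (res c s).isSome) := by
  induction sequences with
  | nil => rfl
  | cons s t ih =>
    rw [List.filterMap_cons, List.countP_cons]
    cases h : res c s with
    | none => simp [h, ih]
    | some v => simp [h, ih]

-- ---------- injectivity of Python's str(list_of_str) ----------

def decEsc (q e : Char) : Option Char :=
  if e = '\\' then some '\\' else if e = q then some q
  else if e = 't' then some '\t' else if e = 'n' then some '\n'
  else if e = 'r' then some '\r' else none

def decStr (q : Char) : Nat → List Char → Option (List Char × List Char)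
  | 0, _ => none
  | _ + 1, [] => none
  | fuel + 1, c :: cs =>
    if c = q then some ([], cs)
    else if c = '\\' then
      match cs with
      | [] => none
      | e :: cs' =>
        match decEsc q e with
        | none => none
        | some d => (decStr q fuel cs').map (fun sr => (d :: sr.1, sr.2))
    else (decStr q fuel cs).map (fun sr => (c :: sr.1, sr.2))

def decItems : Nat → List Char → Option (List (List Char))
  | 0, _ => none
  | _ + 1, [] => none
  | fuel + 1, q :: cs =>
    match decStr q cs.length cs with
    | none => none
    | some sr =>
      match sr.2 with
      | [']'] => some [sr.1]
      | ',' :: ' ' :: rest => (decItems fuel rest).map (fun t => sr.1 :: t)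
      | _ => none

def decKey : List Char → Option (List (List Char))
  | '[' :: rest => if rest = [']'] then some [] else decItems rest.length rest
  | _ => none

theorem le_length_pvReprChars (q : Char) (cs : List Char) :
    cs.length ≤ (pvReprChars q cs).length := by
  induction cs with
  | nil => simp [pvReprChars]
  | cons c t ih =>
    rw [pvReprChars]
    split_ifs <;> simp <;> omega

theorem decStr_enc (q : Char) (hq : q = '\'' ∨ q = '"') :
    ∀ (cs : List Char) (fuel : Nat) (rest : List Char), cs.length < fuel →
      decStr q fuel (pvReprChars q cs ++ q :: rest) = some (cs, rest) := by
  have hq1 : ¬(q = '\\') := by rcases hq with rfl | rfl <;> decide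
  have hbq : ¬(('\\' : Char) = q) := by rcases hq with rfl | rfl <;> decide
  have htq : ¬(('t' : Char) = q) := by rcases hq with rfl | rfl <;> decide
  have hnq : ¬(('n' : Char) = q) := by rcases hq with rfl | rfl <;> decide
  have hrq : ¬(('r' : Char) = q) := by rcases hq with rfl | rfl <;> decide
  intro cs
  induction cs with
  | nil =>
    intro fuel rest hf
    obtain ⟨f, rfl⟩ := Nat.exists_eq_succ_of_ne_zero (by omega : fuel ≠ 0)
    simp [pvReprChars, decStr]
  | cons c t ih =>
    intro fuel rest hf
    obtain ⟨f, rfl⟩ := Nat.exists_eq_succ_of_ne_zero (by omega : fuel ≠ 0)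
    have hrec := ih f rest (by simp at hf; omega)
    rw [pvReprChars]
    split_ifs with h1 h2 h3 h4 h5
    · subst h1
      simp only [List.cons_append, List.nil_append, List.append_assoc]
      rw [decStr]
      simp [hbq, decEsc, hrec]
    · subst h2
      simp only [List.cons_append, List.nil_append, List.append_assoc]
      rw [decStr]
      simp [hbq, hq1, decEsc, hrec]
    · subst h3
      simp only [List.cons_append, List.nil_append, List.append_assoc]
      rw [decStr]
      simp [hbq, htq, decEsc, hrec]
    · subst h4
      simp only [List.cons_append, List.nil_append, List.append_assoc]
      rw [decStr]
      simp [hbq, hnq, decEsc, hrec]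
    · subst h5
      simp only [List.cons_append, List.nil_append, List.append_assoc]
      rw [decStr]
      simp [hbq, hrq, decEsc, hrec]
    · simp only [List.cons_append, List.nil_append, List.append_assoc]
      rw [decStr.eq_def]
      simp [h1, h2, hrec]

theorem pvEncItem_quote (cs : List Char) :
    ∃ q, (q = '\'' ∨ q = '"') ∧ pvEncItem cs = q :: (pvReprChars q cs ++ [q]) := by
  unfold pvEncItem
  by_cases h : cs.contains '\'' && !cs.contains '"'
  · exact ⟨'"', Or.inr rfl, by rw [if_pos h]⟩
  · exact ⟨'\'', Or.inl rfl, by rw [if_neg h]⟩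

theorem two_le_length_pvEncItem (cs : List Char) : 2 ≤ (pvEncItem cs).length := by
  obtain ⟨q, _, hq⟩ := pvEncItem_quote cs
  rw [hq]; simp

theorem decItems_enc :
    ∀ (subs : List (List Char)) (fuel : Nat), subs ≠ [] → subs.length ≤ fuel →
      decItems fuel (pvJoin (subs.map pvEncItem) ++ [']']) = some subs := by
  intro subs
  induction subs with
  | nil => intro fuel h; exact absurd rfl h
  | cons c t ih =>
    intro fuel _ hf
    obtain ⟨f, rfl⟩ := Nat.exists_eq_succ_of_ne_zero (by simp at hf; omega : fuel ≠ 0)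
    obtain ⟨q, hqq, henc⟩ := pvEncItem_quote c
    cases t with
    | nil =>
      simp only [List.map_cons, List.map_nil, pvJoin, henc, List.cons_append, List.append_assoc,
        List.singleton_append, List.nil_append]
      rw [decItems]
      rw [decStr_enc q hqq c (pvReprChars q c ++ q :: [']']).length [']']
        (by have := le_length_pvReprChars q c; simp [List.length_append]; omega)]
      rfl
    | cons c2 t2 =>
      simp only [List.map_cons, pvJoin, henc, List.cons_append, List.append_assoc,
        List.singleton_append, List.nil_append]
      rw [decItems]
      rw [decStr_enc q hqq c _ (',' :: ' ' :: (pvJoin (pvEncItem c2 :: t2.map pvEncItem) ++ [']']))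
        (by have := le_length_pvReprChars q c; simp [List.length_append]; omega)]
      have iht := ih f (by simp) (by simp at hf ⊢; omega)
      simp only [List.map_cons] at iht
      simp [iht]

theorem one_le_length_pvJoin (subs : List (List Char)) (h : subs ≠ []) :
    subs.length ≤ (pvJoin (subs.map pvEncItem)).length := by
  induction subs with
  | nil => exact absurd rfl h
  | cons c t ih =>
    cases t with
    | nil =>
      have := two_le_length_pvEncItem c
      simp only [List.map_cons, List.map_nil, pvJoin, List.length_cons, List.length_nil]
      omega
    | cons c2 t2 =>
      have ht := ih (by simp)
      have h2 := two_le_length_pvEncItem c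
      simp only [List.map_cons, pvJoin, List.length_append, List.length_cons] at ht ⊢
      omega

theorem decKey_enc (subs : List (List Char)) :
    decKey ('[' :: (pvJoin (subs.map pvEncItem) ++ [']'])) = some subs := by
  cases subs with
  | nil => simp [pvJoin, decKey]
  | cons c t =>
    obtain ⟨q, hqq, henc⟩ := pvEncItem_quote c
    have hqne : q ≠ ']' := by rcases hqq with rfl | rfl <;> decide
    have hhead : ∃ tl, pvJoin ((c :: t).map pvEncItem) = q :: tl := by
      cases t with
      | nil => exact ⟨pvReprChars q c ++ [q], by simp [pvJoin, henc]⟩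
      | cons c2 t2 =>
        exact ⟨(pvReprChars q c ++ [q]) ++ ',' :: ' ' :: pvJoin ((c2 :: t2).map pvEncItem),
          by simp [pvJoin, henc]⟩
    obtain ⟨tl, htl⟩ := hhead
    rw [htl]
    have hne : (q :: tl) ++ [']'] ≠ [']'] := by simp
    show decKey ('[' :: ((q :: tl) ++ [']'])) = some (c :: t)
    rw [decKey]
    rw [if_neg hne]
    rw [← htl]
    apply decItems_enc _ _ (by simp)
    have hlen := one_le_length_pvJoin (c :: t) (by simp)
    simp only [List.length_append, List.length_cons] at hlen ⊢
    omega

theorem pvKey_inj : Function.Injective pvKey := by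
  intro a b h
  unfold pvKey at h
  have h2 : '[' :: (pvJoin (a.map (fun s => pvEncItem s.toList)) ++ [']'])
      = '[' :: (pvJoin (b.map (fun s => pvEncItem s.toList)) ++ [']']) := by
    have := congrArg String.toList h
    simpa using this
  have ha := decKey_enc (a.map String.toList)
  have hb := decKey_enc (b.map String.toList)
  simp only [List.map_map] at ha hb
  have hfun : (fun s => pvEncItem (String.toList s)) = (pvEncItem ∘ String.toList) := rfl
  rw [hfun] at h2
  rw [h2] at ha
  rw [ha] at hb
  have hmaps : a.map String.toList = b.map String.toList := by
    exact Option.some.inj hb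
  have hinj : Function.Injective String.toList := by
    intro s t hst
    have := congrArg String.ofList hst
    simpa using this
  exact List.map_injective_iff.mpr hinj hmaps

-- ---------- A's dict-increment loop collapses to one insert of the count ----------

theorem incr_loop_eq (k : String) (p : List String → Bool) (sequences : List (List String))
    (occ : PySem.Dict String Int) :
    sequences.foldl (fun occ seq =>
        if p seq then
          match occ.get? k with
          | some c => occ.insert k (c + 1)
          | none => occ.insert k 1
        else occ) occ
      = if (sequences.countP p : Int) ≠ 0 then occ.insert k (occ.getD k 0 + sequences.countP p)
        else occ := by
  induction sequences generalizing occ with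
  | nil => simp
  | cons seq rest ih =>
    simp only [List.foldl_cons]
    by_cases hp : p seq
    · rw [if_pos hp]
      have hmatch : (match occ.get? k with
          | some c => occ.insert k (c + 1)
          | none => occ.insert k 1) = occ.insert k (occ.getD k 0 + 1) := by
        cases h : occ.get? k with
        | some c => simp [PySem.Dict.getD_of_get?_eq_some _ _ h]
        | none => simp [PySem.Dict.getD_of_get?_eq_none _ _ h]
      rw [hmatch, ih]
      have hc : (List.countP p (seq :: rest) : Int) = (List.countP p rest : Int) + 1 := by
        simp [hp]
      by_cases h0 : (rest.countP p : Int) ≠ 0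
      · rw [if_pos h0, if_pos (by omega)]
        rw [PySem.Dict.getD_insert_self, PySem.Dict.insert_insert_self, hc]
        ring_nf
      · rw [not_not] at h0
        rw [if_neg (by simp [h0]), if_pos (by omega), hc, h0]
        ring_nf
    · rw [if_neg hp, ih]
      have : List.countP p (seq :: rest) = List.countP p rest := by simp [hp]
      rw [this]

-- cnt c = A's support count of candidate c, as an Int
def cntA (sequences : List (List String)) (c : List String) : Int :=
  (sequences.countP (containedA c) : Int)

-- the per-candidate dict step both loops perform, abstracted over the count
def stepK (cnt : List String → Int) (o : PySem.Dict String Int) (c : List String) :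
    PySem.Dict String Int :=
  if cnt c ≠ 0 then o.insert (pvKey c) (o.getD (pvKey c) 0 + cnt c) else o

theorem getD_stepfold_not_mem (cnt : List String → Int) (L : List (List String))
    (occ : PySem.Dict String Int) (c : List String) (h : pvKey c ∉ L.map pvKey) :
    (L.foldl (stepK cnt) occ).getD (pvKey c) 0 = occ.getD (pvKey c) 0 := by
  induction L generalizing occ with
  | nil => rfl
  | cons x t ih =>
    simp only [List.map_cons, List.mem_cons, not_or] at h
    simp only [List.foldl_cons]
    rw [ih _ h.2]
    unfold stepK
    split_ifs with hc
    · rw [PySem.Dict.getD_insert_of_ne _ _ _ h.1]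
    · rfl

theorem getD_stepfold_mem (cnt : List String → Int) (L : List (List String))
    (occ : PySem.Dict String Int) (c : List String) (hmem : c ∈ L)
    (hnd : (L.map pvKey).Nodup) (hfresh : occ.getD (pvKey c) 0 = 0) :
    (L.foldl (stepK cnt) occ).getD (pvKey c) 0 = cnt c := by
  induction L generalizing occ with
  | nil => cases hmem
  | cons x t ih =>
    simp only [List.map_cons, List.nodup_cons] at hnd
    simp only [List.foldl_cons]
    rcases List.mem_cons.mp hmem with rfl | hmem'
    · rw [getD_stepfold_not_mem cnt t _ c hnd.1]
      unfold stepK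
      split_ifs with hc
      · rw [PySem.Dict.getD_insert_self, hfresh]; ring
      · rw [hfresh]; omega
    · apply ih _ hmem' hnd.2
      have hne : pvKey x ≠ pvKey c := by
        intro he
        exact hnd.1 (he ▸ List.mem_map_of_mem hmem')
      unfold stepK
      split_ifs with hc
      · rw [PySem.Dict.getD_insert_of_ne _ _ _ (Ne.symm hne), hfresh]
      · exact hfresh

theorem keys_stepfold (cnt : List String → Int) (L : List (List String))
    (occ : PySem.Dict String Int) (k : String)
    (h : k ∈ (L.foldl (stepK cnt) occ).keys) : k ∈ occ.keys ∨ k ∈ L.map pvKey := by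
  induction L generalizing occ with
  | nil => exact Or.inl h
  | cons x t ih =>
    simp only [List.foldl_cons] at h
    rcases ih _ h with hin | hin
    · unfold stepK at hin
      split_ifs at hin with hc
      · rcases (PySem.Dict.mem_keys_insert _ _ _ _).mp hin with rfl | hin'
        · exact Or.inr (by simp)
        · exact Or.inl hin'
      · exact Or.inl hin
    · exact Or.inr (by simp [hin])

theorem getD_zero_of_fresh (occ : PySem.Dict String Int) (k : String)
    (h : k ∉ occ.keys) : occ.getD k 0 = 0 := by
  apply PySem.Dict.getD_of_not_contains
  rw [← Bool.not_eq_true, PySem.Dict.contains_iff_mem_keys]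
  exact h

-- news (the per-level candidate list) has no duplicates when prefixes share a length
theorem news_nodup (subs : List (List String)) (passes : List String) (n : Nat)
    (hs : subs.Nodup) (hp : passes.Nodup) (hlen : ∀ s ∈ subs, s.length = n) :
    (subs.flatMap (fun s => passes.map (fun p => s ++ [p]))).Nodup := by
  induction subs with
  | nil => simp
  | cons s t ih =>
    simp only [List.flatMap_cons]
    simp only [List.nodup_cons] at hs
    apply List.Nodup.append
    · exact hp.map (fun p p' h => by
        have := List.append_cancel_left h; simpa using this)
    · exact ih hs.2 (fun x hx => hlen x (List.mem_cons_of_mem _ hx))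
    · intro x hx hy
      obtain ⟨p, _, rfl⟩ := List.mem_map.mp hx
      obtain ⟨s', hs', hmm⟩ := List.mem_flatMap.mp hy
      obtain ⟨p', _, heq⟩ := List.mem_map.mp hmm
      have hlen2 : s.length = s'.length := by
        rw [hlen s List.mem_cons_self, hlen s' (List.mem_cons_of_mem _ hs')]
      obtain ⟨h1, _⟩ := List.append_inj heq.symm hlen2
      exact hs.1 (h1 ▸ hs')

-- a fold of the dict step over pairs carrying correct counts is the fold over the candidates
theorem fold_pairs_eq (cnt : List String → Int)
    (L : List (List String × List (List String))) :
    ∀ (occ : PySem.Dict String Int), (∀ cp ∈ L, ((cp.2.length : Int)) = cnt cp.1) →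
    L.foldl (fun o cp =>
        if ((cp.2.length : Int)) ≠ 0 then
          o.insert (pvKey cp.1) (o.getD (pvKey cp.1) 0 + (cp.2.length : Int))
        else o) occ
      = (L.map Prod.fst).foldl (stepK cnt) occ := by
  induction L with
  | nil => intro occ h; rfl
  | cons x t ih =>
    intro occ h
    simp only [List.foldl_cons, List.map_cons]
    have hx := h x List.mem_cons_self
    rw [hx]
    exact ih _ (fun cp hcp => h cp (List.mem_cons_of_mem _ hcp))

theorem map_fst_filter (L : List (List String × List (List String)))
    (q : List String × List (List String) → Bool) (p : List String → Bool)
    (h : ∀ cp ∈ L, q cp = p cp.1) :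
    (L.filter q).map Prod.fst = (L.map Prod.fst).filter p := by
  induction L with
  | nil => rfl
  | cons x t ih =>
    simp only [List.filter_cons, List.map_cons]
    rw [h x List.mem_cons_self]
    cases hp : p x.1
    · simp [ih (fun cp hcp => h cp (List.mem_cons_of_mem _ hcp))]
    · simp [ih (fun cp hcp => h cp (List.mem_cons_of_mem _ hcp))]

-- ---------- the lockstep level induction ----------

-- B's fused inner loop over the passes, characterised
theorem fusedB_inner (sp : List String × List (List String)) :
    ∀ (ps : List String) (acc : List (List String × List (List String)))
      (occ : PySem.Dict String Int),
      ps.foldl (fun (st : List (List String × List (List String)) × PySem.Dict String Int) p =>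
          let candidate := sp.1 ++ [p]
          let projected := projectB sp.2 p
          let count : Int := projected.length
          (if count ≥ 2 then st.1 ++ [(candidate, projected)] else st.1,
           if count ≠ 0 then st.2.insert (pvKey candidate) (st.2.getD (pvKey candidate) 0 + count)
           else st.2)) (acc, occ)
      = (acc ++ (ps.map (fun p => (sp.1 ++ [p], projectB sp.2 p))).filter
            (fun cp => decide ((cp.2.length : Int) ≥ 2)),
         (ps.map (fun p => (sp.1 ++ [p], projectB sp.2 p))).foldl
            (fun o cp => if ((cp.2.length : Int)) ≠ 0 then
                o.insert (pvKey cp.1) (o.getD (pvKey cp.1) 0 + (cp.2.length : Int))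
              else o) occ) := by
  intro ps
  induction ps with
  | nil => intro acc occ; simp
  | cons p t ih =>
    intro acc occ
    simp only [List.foldl_cons, List.map_cons, List.filter_cons]
    rw [ih]
    by_cases h : ((projectB sp.2 p).length : Int) ≥ 2
    · simp [h, List.append_assoc]
    · simp [h]

-- B's fused per-level pass over (prefix, projection) pairs, characterised
theorem fusedB (passes : List String) :
    ∀ (level : List (List String × List (List String)))
      (acc : List (List String × List (List String))) (occ : PySem.Dict String Int),
      level.foldl (fun (st : List (List String × List (List String)) × PySem.Dict String Int) sp =>
          passes.foldl (fun st p =>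
            let candidate := sp.1 ++ [p]
            let projected := projectB sp.2 p
            let count : Int := projected.length
            (if count ≥ 2 then st.1 ++ [(candidate, projected)] else st.1,
             if count ≠ 0 then st.2.insert (pvKey candidate) (st.2.getD (pvKey candidate) 0 + count)
             else st.2)) st) (acc, occ)
      = (acc ++ (level.flatMap (fun sp => passes.map (fun p => (sp.1 ++ [p], projectB sp.2 p)))).filter
            (fun cp => decide ((cp.2.length : Int) ≥ 2)),
         (level.flatMap (fun sp => passes.map (fun p => (sp.1 ++ [p], projectB sp.2 p)))).foldl
            (fun o cp => if ((cp.2.length : Int)) ≠ 0 then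
                o.insert (pvKey cp.1) (o.getD (pvKey cp.1) 0 + (cp.2.length : Int))
              else o) occ) := by
  intro level
  induction level with
  | nil => intro acc occ; simp
  | cons sp t ih =>
    intro acc occ
    simp only [List.foldl_cons, List.flatMap_cons, List.filter_append, List.foldl_append]
    rw [fusedB_inner sp passes acc occ, ih]
    rw [List.append_assoc]

-- pvKey-freshness: a key recorded for a shorter subsequence never collides with a candidate
theorem fresh_key (occ : PySem.Dict String Int) (n : Nat)
    (hkeys : ∀ k ∈ occ.keys, ∃ l : List String, pvKey l = k ∧ l.length ≤ n)
    (c : List String) (hc : c.length = n + 1) : occ.getD (pvKey c) 0 = 0 := by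
  apply getD_zero_of_fresh
  intro hin
  obtain ⟨l, hkl, hlen⟩ := hkeys _ hin
  have := pvKey_inj hkl
  subst this
  omega

theorem level_eq (sequences : List (List String)) (passes : List String)
    (hpnd : passes.Nodup) :
    ∀ (fuel : Nat) (n : Nat) (level : List (List String × List (List String)))
      (occ : PySem.Dict String Int),
      (∀ sp ∈ level, sp.2 = sequences.filterMap (res sp.1) ∧ sp.1.length = n) →
      (level.map Prod.fst).Nodup →
      (∀ k ∈ occ.keys, ∃ l : List String, pvKey l = k ∧ l.length ≤ n) →
      loopA sequences passes fuel (level.map Prod.fst) occ = loopB passes fuel level occ := by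
  intro fuel
  induction fuel with
  | zero => intro n level occ _ _ _; rfl
  | succ fuel ih =>
    intro n level occ hinv hnd hkeys
    rw [loopA, loopB]
    by_cases hnil : level = []
    · subst hnil; simp
    · rw [if_neg (by simpa using hnil), if_neg hnil]
      -- the per-level candidate pair list
      set L := level.flatMap (fun sp => passes.map (fun p => (sp.1 ++ [p], projectB sp.2 p))) with hL
      -- facts about L's members
      have hLmem : ∀ cp ∈ L, cp.2 = sequences.filterMap (res cp.1) ∧ cp.1.length = n + 1 := by
        intro cp hcp
        rw [hL] at hcp
        obtain ⟨sp, hsp, hcp2⟩ := List.mem_flatMap.mp hcp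
        obtain ⟨p, _, rfl⟩ := List.mem_map.mp hcp2
        obtain ⟨hproj, hlen⟩ := hinv sp hsp
        constructor
        · rw [hproj, filterMap_res_append]
        · simp [hlen]
      have hcnt : ∀ cp ∈ L, ((cp.2.length : Int)) = cntA sequences cp.1 := by
        intro cp hcp
        obtain ⟨hproj, _⟩ := hLmem cp hcp
        rw [hproj, length_filterMap_res]
        unfold cntA
        congr 1
        apply List.countP_congr
        intro seq _
        rw [containedA_eq_res]
      -- news (A's candidate list) is L's first components
      have hnews : (level.map Prod.fst).flatMap (fun s => passes.map (fun p => s ++ [p]))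
          = L.map Prod.fst := by
        rw [hL]
        simp [List.map_flatMap, List.flatMap_map, List.map_map, Function.comp_def]
      have hnewsnd : (L.map Prod.fst).Nodup := by
        rw [← hnews]
        exact news_nodup _ passes n hnd hpnd (fun s hs => by
          obtain ⟨sp, hsp, rfl⟩ := List.mem_map.mp hs
          exact (hinv sp hsp).2)
      have hkeysnd : ((L.map Prod.fst).map pvKey).Nodup := hnewsnd.map pvKey_inj
      have hfreshL : ∀ c ∈ L.map Prod.fst, occ.getD (pvKey c) 0 = 0 := by
        intro c hc
        obtain ⟨cp, hcp, rfl⟩ := List.mem_map.mp hc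
        exact fresh_key occ n hkeys _ (hLmem cp hcp).2
      -- collapse A's per-candidate dict loop to the abstract step
      have hpoint : ∀ (o : PySem.Dict String Int) (c : List String),
          sequences.foldl (fun occ seq =>
            if containedA c seq then
              match occ.get? (pvKey c) with
              | some cc => occ.insert (pvKey c) (cc + 1)
              | none => occ.insert (pvKey c) 1
            else occ) o
          = stepK (cntA sequences) o c := by
        intro o c
        rw [incr_loop_eq (pvKey c) (containedA c) sequences o]
        rfl
      -- normalise A's three passes
      simp only [PySem.List.foldl_append_singleton_eq_map, PySem.List.foldl_append_eq_flatMap,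
        List.nil_append, hpoint, PySem.List.foldl_append_if_eq_filter]
      -- A's membership guard in the filter is redundant
      have hfilter : ∀ (d : PySem.Dict String Int) (c : List String),
          (d.contains (pvKey c) && decide (d.getD (pvKey c) 0 ≥ 2))
            = decide (d.getD (pvKey c) 0 ≥ 2) := by
        intro d c
        cases hc : d.contains (pvKey c) with
        | true => simp
        | false => simp [PySem.Dict.getD_of_not_contains d 0 hc]
      simp only [hfilter]
      -- normalise B's fused pass
      rw [fusedB passes level [] occ, ← hL, List.nil_append]
      -- the two dicts after the level agree
      rw [hnews, fold_pairs_eq (cntA sequences) L occ hcnt]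
      -- the two survivor lists agree
      have hrem : (L.map Prod.fst).filter
            (fun c => decide (((L.map Prod.fst).foldl (stepK (cntA sequences)) occ).getD (pvKey c) 0 ≥ 2))
          = (L.filter (fun cp => decide ((cp.2.length : Int) ≥ 2))).map Prod.fst := by
        rw [map_fst_filter L _ _ ?_]
        intro cp hcp
        have h1 : ((L.map Prod.fst).foldl (stepK (cntA sequences)) occ).getD (pvKey cp.1) 0
            = cntA sequences cp.1 :=
          getD_stepfold_mem _ _ _ _ (List.mem_map_of_mem hcp) hkeysnd
            (hfreshL _ (List.mem_map_of_mem hcp))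
        rw [h1, ← hcnt cp hcp]
      rw [hrem]
      -- recurse with the level invariants one step deeper
      apply ih (n + 1)
      · intro sp hsp
        exact hLmem sp (List.mem_of_mem_filter hsp)
      · rw [← hrem]
        exact hnewsnd.filter _
      · intro k hk
        rcases keys_stepfold (cntA sequences) (L.map Prod.fst) occ k hk with hin | hin
        · obtain ⟨l, hkl, hlen⟩ := hkeys k hin
          exact ⟨l, hkl, by omega⟩
        · obtain ⟨c, hc, rfl⟩ := List.mem_map.mp hin
          obtain ⟨cp, hcp, rfl⟩ := List.mem_map.mp hc
          exact ⟨cp.1, rfl, by rw [(hLmem cp hcp).2]⟩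

-- A's passes (built through set()) in the dedup order both ports share
theorem passes_eq (sequences : List (List String)) :
    sequences.foldl (fun ps seq => seq.foldl (fun ps p => PySem.Set.add ps p) ps) PySem.Set.empty
      = PySem.List.dedup (sequences.flatMap (fun s => s)) := by
  rw [PySem.List.dedup_eq_ofList, PySem.Set.ofList_eq_foldl, List.foldl_flatMap]
  rfl

-- ===== VERDICT (by name: the statement is the Claim_ definition above) =====
theorem find_frequent_subsequences_py_spec : Claim_equal_find_frequent_subsequences_py := by
  intro sequences _
  unfold Spec_find_frequent_subsequences_py find_frequent_subsequences_py find_frequent_subsequences_py_alt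
  simp only [passes_eq, PySem.List.foldl_append_singleton_eq_map, List.nil_append]
  rw [show (PySem.List.dedup (sequences.flatMap fun s => s)).map (fun p => [p])
      = ((PySem.List.dedup (sequences.flatMap fun s => s)).map
          (fun p => ([p], projectB sequences p))).map Prod.fst by simp]
  rw [level_eq sequences _ (PySem.List.nodup_dedup _) _ 1 _ _
    (by
      intro sp hsp
      obtain ⟨p, _, rfl⟩ := List.mem_map.mp hsp
      refine ⟨?_, rfl⟩
      rw [projectB_eq]
      apply List.filterMap_congr
      intro seq _
      rw [res_single])
    (by
      simp only [List.map_map]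
      exact (PySem.List.nodup_dedup _).map (fun a b h => by simpa using h))
    (by simp [PySem.Dict.keys_empty])]
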